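-- pv_equiv track=rewrite | github.com/b-winter30/hmgcc-authorship-detection-feature-extraction | helpers.py | reconstruct_parent_words
-- ===== SOURCE A (Python) =====
-- def reconstruct_parent_words(detailed_results):
--     """
--     Post-process token-level NTP results to reconstruct the full parent word.
--     Uses token_raw (pre-strip) to detect word boundaries via leading space.
--     """
--     if not detailed_results:
--         return detailed_results
--
--     word_groups = []
--     current_group = []
--
--     for i, result in enumerate(detailed_results):
--         raw = result.get("token_raw", result.get("token", ""))
--
--         is_word_start = (
--             i == 0
--             or raw.startswith(" ")
--             or raw.startswith("\n")
--             or raw.startswith("\t")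
--         )
--
--         if is_word_start and current_group:
--             word_groups.append(current_group)
--             current_group = []
--
--         current_group.append(i)
--
--     if current_group:
--         word_groups.append(current_group)
--
--     for group in word_groups:
--         full_word = "".join(
--             detailed_results[idx].get("token_raw", detailed_results[idx].get("token", ""))
--             for idx in group
--         ).strip()
--
--         for idx in group:
--             token_stripped = detailed_results[idx].get("token", "").strip()
--             detailed_results[idx]["parent_word"] = full_word if full_word != token_stripped else None
--
--     return detailed_results
-- ===== SOURCE B (Python) =====
-- def reconstruct_parent_words(detailed_results):
--     """Label-and-lookup rewrite: one pass assigns each token a group id and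
--     accumulates each group's raw text in a dict keyed by that id; a flat second
--     pass over zip(results, labels) looks the finished word up and writes
--     parent_word. No index-group lists are built. Mutates dicts in place like A."""
--     if not detailed_results:
--         return detailed_results
--
--     labels = []
--     words = {}
--     gid = -1
--     for i, result in enumerate(detailed_results):
--         raw = result.get("token_raw", result.get("token", ""))
--         if i == 0 or raw.startswith((" ", "\n", "\t")):
--             gid += 1
--             words[gid] = ""
--         labels.append(gid)
--         words[gid] += raw
--
--     for result, gid in zip(detailed_results, labels):
--         full_word = words[gid].strip()
--         token_stripped = result.get("token", "").strip()
--         result["parent_word"] = full_word if full_word != token_stripped else None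
--
--     return detailed_results
-- ===== Notes on version B (the rewrite author's own statement) =====
-- stated objective: alternative
-- what changed: B replaces A's group-materializing structure (build word_groups as lists of indices, then a nested loop over groups that joins per group and writes back by subscripting) with a label-and-lookup scheme: one pass assigns every token a group id while accumulating each group's raw text in a dict keyed by that id, then a single flat pass over zip(results, labels) looks the finished word up in the dict and writes parent_word - no group lists, no nested loops, no index subscripting.
import Mathlib
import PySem

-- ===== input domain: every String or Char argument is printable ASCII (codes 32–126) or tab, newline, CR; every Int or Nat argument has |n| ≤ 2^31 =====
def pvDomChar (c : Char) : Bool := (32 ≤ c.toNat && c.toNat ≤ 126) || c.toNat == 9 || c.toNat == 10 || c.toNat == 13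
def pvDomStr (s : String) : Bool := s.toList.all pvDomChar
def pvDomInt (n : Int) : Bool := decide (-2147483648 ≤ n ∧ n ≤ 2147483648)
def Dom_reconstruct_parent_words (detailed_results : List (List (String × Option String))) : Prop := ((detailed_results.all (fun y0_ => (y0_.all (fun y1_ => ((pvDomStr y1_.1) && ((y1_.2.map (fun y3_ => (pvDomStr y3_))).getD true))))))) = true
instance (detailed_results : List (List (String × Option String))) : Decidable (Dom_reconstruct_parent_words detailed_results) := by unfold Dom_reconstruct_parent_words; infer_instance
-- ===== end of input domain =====

-- B replaces A's index-group structure (collect word_groups as index lists, then a nested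
-- loop joining and writing back by subscript) with a label-and-lookup scheme: one pass labels
-- each token with a group id while accumulating each group's raw text in a dict, then one flat
-- pass over the zipped labels writes parent_word; same return value (A also mutates its
-- argument's dicts in place; the equivalence proved here is about the return value only).


-- ===== PORT A =====
-- result.get("token_raw", result.get("token", "")): a dict value may itself be Python None (Option.none)
def pvRaw (d : List (String × Option String)) : Option String :=
  ((PySem.Dict.mk d).get? "token_raw").getD (((PySem.Dict.mk d).get? "token").getD (some ""))

-- the raw value as a String; under Pre_ it is never Python None, so getD "" is exact
def pvRawS (d : List (String × Option String)) : String := (pvRaw d).getD ""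

-- result.get("token", "")
def pvTok (d : List (String × Option String)) : Option String :=
  ((PySem.Dict.mk d).get? "token").getD (some "")

-- raw.startswith(" ") or raw.startswith("\n") or raw.startswith("\t")  (A);
-- raw.startswith((" ", "\n", "\t"))  (B) — the same disjunction
def pvIsWS (raw : String) : Bool :=
  PySem.Str.startswith raw " " || PySem.Str.startswith raw "\n" || PySem.Str.startswith raw "\t"

-- body of A's first loop (over enumerate): state = (word_groups, current_group) of Int indices
def pvStep1 (st : List (List Int) × List Int) (p : Int × List (String × Option String)) :
    List (List Int) × List Int :=
  let raw := pvRawS p.2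
  let isStart := p.1 == 0 || pvIsWS raw
  if isStart && !st.2.isEmpty then (st.1 ++ [st.2], [p.1]) else (st.1, st.2 ++ [p.1])

-- body of A's second loop: join the group's raws, strip, then write parent_word at each index
def pvPassGroup (acc : List (List (String × Option String))) (group : List Int) :
    List (List (String × Option String)) :=
  let full := PySem.Str.strip (PySem.Str.join ""
    (group.map (fun idx => pvRawS (PySem.List.pyGetD acc idx []))))
  group.foldl
    (fun acc idx =>
      let d := PySem.List.pyGetD acc idx []
      let ts := PySem.Str.strip ((pvTok d).getD "")
      PySem.List.pySetD acc idx
        ((PySem.Dict.mk d).insert "parent_word" (if full ≠ ts then some full else none)).items)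
    acc

def reconstruct_parent_words (detailed_results : List (List (String × Option String))) :
    List (List (String × Option String)) :=
  if detailed_results.isEmpty then detailed_results
  else
    let st := (PySem.List.enumerate detailed_results 0).foldl pvStep1 ([], [])
    let wordGroups := if !st.2.isEmpty then st.1 ++ [st.2] else st.1
    wordGroups.foldl pvPassGroup detailed_results

-- ===== PORT B =====
-- B's labelling pass: state = (labels, words, gid); at a word start open a fresh dict entry,
-- then append the label and add the raw text to the current entry
def pvStepB (st : List Int × PySem.Dict Int String × Int)
    (p : Int × List (String × Option String)) :
    List Int × PySem.Dict Int String × Int :=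
  let raw := pvRawS p.2
  let wg :=
    if p.1 == 0 || pvIsWS raw then (st.2.1.insert (st.2.2 + 1) "", st.2.2 + 1)
    else (st.2.1, st.2.2)
  (st.1 ++ [wg.2], wg.1.insert wg.2 (wg.1.getD wg.2 "" ++ raw), wg.2)

def reconstruct_parent_words_alt (detailed_results : List (List (String × Option String))) :
    List (List (String × Option String)) :=
  if detailed_results.isEmpty then detailed_results
  else
    let st := (PySem.List.enumerate detailed_results 0).foldl pvStepB ([], PySem.Dict.empty, -1)
    (detailed_results.zip st.1).map (fun p =>
      let full := PySem.Str.strip (st.2.1.getD p.2 "")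
      let ts := PySem.Str.strip ((pvTok p.1).getD "")
      ((PySem.Dict.mk p.1).insert "parent_word" (if full ≠ ts then some full else none)).items)

-- ===== PRECONDITION & SPEC =====
-- Pre_ excludes exactly the inputs on which Python A raises (TypeError/AttributeError):
-- some dict whose effective raw value or whose "token" value is Python None.
def Pre_reconstruct_parent_words (detailed_results : List (List (String × Option String))) : Prop :=
  ∀ d ∈ detailed_results, (pvRaw d).isSome = true ∧ (pvTok d).isSome = true
instance (detailed_results : List (List (String × Option String))) : Decidable (Pre_reconstruct_parent_words detailed_results) := by unfold Pre_reconstruct_parent_words; infer_instance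

def pvWitness_reconstruct_parent_words : (List (List (String × Option String))) :=
  [[("token", some "He"), ("token_raw", some " He")], [("token", some "llo")], [("x", none)]]

def Spec_reconstruct_parent_words (detailed_results : List (List (String × Option String))) (out : List (List (String × Option String))) : Prop := out = reconstruct_parent_words_alt detailed_results
instance (detailed_results : List (List (String × Option String))) (out : List (List (String × Option String))) : Decidable (Spec_reconstruct_parent_words detailed_results out) := by unfold Spec_reconstruct_parent_words; infer_instance

-- ===== CLAIM (what is proved, stated in full; the proofs are below) =====
def Claim_equal_reconstruct_parent_words : Prop := ∀ (detailed_results : List (List (String × Option String))), Dom_reconstruct_parent_words detailed_results → Pre_reconstruct_parent_words detailed_results → Spec_reconstruct_parent_words detailed_results (reconstruct_parent_words detailed_results)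

-- ===== LEMMAS AND PROOFS =====

-- the value written for one dict, given the group's full word
def pvPassF (full : String) (d : List (String × Option String)) : List (String × Option String) :=
  ((PySem.Dict.mk d).insert "parent_word"
    (if full ≠ PySem.Str.strip ((pvTok d).getD "") then some full else none)).items

-- the raw text of one word group, joined
def pvWordOf (g : List (List (String × Option String))) : String :=
  PySem.Str.join "" (g.map pvRawS)

-- one word group of dicts, fully processed
def pvProcess (g : List (List (String × Option String))) : List (List (String × Option String)) :=
  g.map (pvPassF (PySem.Str.strip (pvWordOf g)))

-- grouping of the dicts into word groups (cur = the open group, nonempty)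
def pvGo (cur : List (List (String × Option String))) :
    List (List (String × Option String)) → List (List (List (String × Option String)))
  | [] => [cur]
  | d :: rest => if pvIsWS (pvRawS d) then cur :: pvGo [d] rest else pvGo (cur ++ [d]) rest

-- index-level mirror of A's first loop from position s on (cur = open group of indices)
def pvIgo (cur : List Int) (s : Int) :
    List (List (String × Option String)) → (List (List Int) × List Int)
  | [] => ([], cur)
  | d :: rest =>
      if pvIsWS (pvRawS d) then
        let r := pvIgo [s] (s + 1) rest
        (cur :: r.1, r.2)
      else pvIgo (cur ++ [s]) (s + 1) rest

def pvIntRange (m k : Nat) : List Int := (List.range' m k).map (fun j => (j : Int))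

theorem pvIgo_snd_ne (rest : List (List (String × Option String))) :
    ∀ (cur : List Int) (s : Int), cur ≠ [] → (pvIgo cur s rest).2 ≠ [] := by
  induction rest with
  | nil => intro cur s h; simpa [pvIgo] using h
  | cons d rest ih =>
      intro cur s h
      by_cases hw : pvIsWS (pvRawS d) = true
      · simpa [pvIgo, hw] using ih [s] (s + 1) (by simp)
      · simpa [pvIgo, hw] using ih (cur ++ [s]) (s + 1) (by simp)

theorem pvEnum_fold (rest : List (List (String × Option String))) :
    ∀ (s : Int) (wg : List (List Int)) (cur : List Int), 1 ≤ s → cur ≠ [] →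
      (PySem.List.enumerate rest s).foldl pvStep1 (wg, cur) =
        (wg ++ (pvIgo cur s rest).1, (pvIgo cur s rest).2) := by
  induction rest with
  | nil => intro s wg cur _ _; simp [pvIgo, PySem.List.enumerate]
  | cons d rest ih =>
      intro s wg cur hs hc
      rw [PySem.List.enumerate_cons, List.foldl_cons]
      have hz : (s == 0) = false := by simp; omega
      have hne : cur.isEmpty = false := by simpa [List.isEmpty_iff] using hc
      by_cases hw : pvIsWS (pvRawS d) = true
      · have hstep : pvStep1 (wg, cur) (s, d) = (wg ++ [cur], [s]) := by
          simp [pvStep1, hz, hw, hne]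
        rw [hstep, ih (s + 1) (wg ++ [cur]) [s] (by omega) (by simp)]
        simp [pvIgo, hw]
      · have hstep : pvStep1 (wg, cur) (s, d) = (wg, cur ++ [s]) := by
          simp [pvStep1, hz, hne]
          simpa using hw
        rw [hstep, ih (s + 1) wg (cur ++ [s]) (by omega) (by simp)]
        simp [pvIgo, hw]

theorem pvReads (k : Nat) :
    ∀ (P suffix : List (List (String × Option String))), k ≤ suffix.length →
      (pvIntRange P.length k).map (fun idx => PySem.List.pyGetD (P ++ suffix) idx []) =
        suffix.take k := by
  induction k with
  | zero => intro P suffix h; simp [pvIntRange]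
  | succ k ih =>
      intro P suffix h
      cases suffix with
      | nil => simp at h
      | cons x xs =>
          have e1 : pvIntRange P.length (k + 1) = (P.length : Int) :: pvIntRange (P ++ [x]).length k := by
            simp [pvIntRange, List.range'_succ]
          have e2 : PySem.List.pyGetD (P ++ x :: xs) ((P.length : Nat) : Int) [] = x := by
            simp [List.getD_eq_getElem?_getD]
          have e3 : P ++ x :: xs = (P ++ [x]) ++ xs := by simp
          rw [e1, List.map_cons, e2, e3, ih (P ++ [x]) xs (by simpa using h)]
          simp

theorem pvWrites (k : Nat) (f : List (String × Option String) → List (String × Option String)) :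
    ∀ (P suffix : List (List (String × Option String))), k ≤ suffix.length →
      (pvIntRange P.length k).foldl
          (fun acc idx => PySem.List.pySetD acc idx (f (PySem.List.pyGetD acc idx []))) (P ++ suffix) =
        P ++ (suffix.take k).map f ++ suffix.drop k := by
  induction k with
  | zero => intro P suffix h; simp [pvIntRange]
  | succ k ih =>
      intro P suffix h
      cases suffix with
      | nil => simp at h
      | cons x xs =>
          have e1 : pvIntRange P.length (k + 1) = (P.length : Int) :: pvIntRange (P ++ [f x]).length k := by
            simp [pvIntRange, List.range'_succ]
          have e2 : PySem.List.pyGetD (P ++ x :: xs) ((P.length : Nat) : Int) [] = x := by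
            simp [List.getD_eq_getElem?_getD]
          have e4 : (P ++ x :: xs).set P.length (f x) = (P ++ [f x]) ++ xs := by
            rw [List.set_append_right _ _ (Nat.le_refl _)]
            simp
          rw [e1, List.foldl_cons, e2]
          rw [show PySem.List.pySetD (P ++ x :: xs) ((P.length : Nat) : Int) (f x) = (P ++ [f x]) ++ xs from by
            rw [PySem.List.pySetD_natCast]; exact e4]
          rw [ih (P ++ [f x]) xs (by simpa using h)]
          simp

theorem pvPassGroup_run (P curD suffix : List (List (String × Option String))) :
    pvPassGroup (P ++ (curD ++ suffix)) (pvIntRange P.length curD.length) =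
      P ++ (pvProcess curD ++ suffix) := by
  have hr : (pvIntRange P.length curD.length).map
      (fun idx => PySem.List.pyGetD (P ++ (curD ++ suffix)) idx []) = curD := by
    rw [pvReads curD.length P (curD ++ suffix) (by simp)]
    simp
  have hmap : (pvIntRange P.length curD.length).map
      (fun idx => pvRawS (PySem.List.pyGetD (P ++ (curD ++ suffix)) idx [])) = curD.map pvRawS := by
    have h2 := congrArg (List.map pvRawS) hr
    rw [List.map_map] at h2
    exact h2
  unfold pvPassGroup
  rw [hmap]
  show (pvIntRange P.length curD.length).foldl
      (fun acc idx => PySem.List.pySetD acc idx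
        (pvPassF (PySem.Str.strip (PySem.Str.join "" (curD.map pvRawS)))
          (PySem.List.pyGetD acc idx []))) (P ++ (curD ++ suffix)) =
    P ++ (pvProcess curD ++ suffix)
  rw [pvWrites curD.length
      (pvPassF (PySem.Str.strip (PySem.Str.join "" (curD.map pvRawS)))) P (curD ++ suffix) (by simp)]
  simp [pvProcess, pvWordOf]

theorem pvMain (rest : List (List (String × Option String))) :
    ∀ (curD P : List (List (String × Option String))), curD ≠ [] →
      (((pvIgo (pvIntRange P.length curD.length) ((P.length + curD.length : Nat) : Int) rest).1)
          ++ [(pvIgo (pvIntRange P.length curD.length) ((P.length + curD.length : Nat) : Int) rest).2]).foldl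
          pvPassGroup (P ++ (curD ++ rest)) =
        P ++ ((pvGo curD rest).map pvProcess).flatten := by
  induction rest with
  | nil =>
      intro curD P hc
      simp only [pvIgo, pvGo, List.nil_append, List.foldl_cons, List.foldl_nil]
      rw [show P ++ (curD ++ []) = P ++ (curD ++ ([] : List (List (String × Option String)))) from rfl]
      rw [pvPassGroup_run P curD []]
      simp
  | cons d rest ih =>
      intro curD P hc
      by_cases hw : pvIsWS (pvRawS d) = true
      · simp only [pvIgo, hw, if_pos]
        rw [List.cons_append, List.foldl_cons]
        have h1 : pvPassGroup (P ++ (curD ++ (d :: rest))) (pvIntRange P.length curD.length) =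
            (P ++ pvProcess curD) ++ ([d] ++ rest) := by
          rw [pvPassGroup_run P curD (d :: rest)]
          simp
        rw [h1]
        have hlen : (P ++ pvProcess curD).length = P.length + curD.length := by
          simp [pvProcess]
        have h2 : pvIntRange (P ++ pvProcess curD).length ([d] : List (List (String × Option String))).length =
            [((P.length + curD.length : Nat) : Int)] := by
          simp [pvIntRange, hlen]
        have h3 : (((P ++ pvProcess curD).length + ([d] : List (List (String × Option String))).length : Nat) : Int) =
            ((P.length + curD.length : Nat) : Int) + 1 := by
          simp [hlen]
        have := ih [d] (P ++ pvProcess curD) (by simp)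
        rw [h2, h3] at this
        rw [this]
        simp [pvGo, hw]
      · simp only [pvIgo, hw, if_neg, Bool.not_eq_true]
        have h4 : pvIntRange P.length curD.length ++ [((P.length + curD.length : Nat) : Int)] =
            pvIntRange P.length (curD ++ [d]).length := by
          simp [pvIntRange, List.range'_concat]
        have h5 : ((P.length + curD.length : Nat) : Int) + 1 =
            ((P.length + (curD ++ [d]).length : Nat) : Int) := by
          simp
          omega
        have h6 : P ++ (curD ++ (d :: rest)) = P ++ ((curD ++ [d]) ++ rest) := by simp
        rw [h4, h5, h6, ih (curD ++ [d]) P (by simp)]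
        simp [pvGo, hw]

-- ===== B-side lemmas =====

theorem chars_join_append (L : List (List Char)) (c : List Char) :
    PySem.Chars.join [] (L ++ [c]) = PySem.Chars.join [] L ++ c := by
  induction L with
  | nil => simp [PySem.Chars.join_nil, PySem.Chars.join_singleton]
  | cons a L ih =>
      cases L with
      | nil => simp [PySem.Chars.join_singleton, PySem.Chars.join_cons_cons]
      | cons b L => simp only [List.cons_append, PySem.Chars.join_cons_cons] at *; simp [ih]

theorem pvWordOf_append (g : List (List (String × Option String)))
    (d : List (String × Option String)) :
    pvWordOf (g ++ [d]) = pvWordOf g ++ pvRawS d := by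
  simp [pvWordOf, PySem.Str.join, chars_join_append]

theorem pvWordOf_single (d : List (String × Option String)) :
    pvWordOf [d] = pvRawS d := by
  simp [pvWordOf, PySem.Str.join]

-- labels of a group list, group j0 + k labelled j0 + k
def pvLabels (j : Int) : List (List (List (String × Option String))) → List Int
  | [] => []
  | g :: gs => g.map (fun _ => j) ++ pvLabels (j + 1) gs

-- the dict's word for label j (out of range: the dict's default "")
def pvWordsF (gs : List (List (List (String × Option String)))) (j : Int) : String :=
  if 0 ≤ j then pvWordOf (gs.getD j.toNat []) else ""

theorem pvLabels_append (j : Int) (G : List (List (List (String × Option String))))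
    (g : List (List (String × Option String))) :
    pvLabels j (G ++ [g]) = pvLabels j G ++ g.map (fun _ => j + (G.length : Int)) := by
  induction G generalizing j with
  | nil => simp [pvLabels]
  | cons a G ih =>
      simp only [List.cons_append, pvLabels, ih (j + 1), List.append_assoc]
      have : j + 1 + (G.length : Int) = j + ((G.length : Int) + 1) := by ring
      simp [this]

theorem pvWordsF_snoc_ne (G : List (List (List (String × Option String))))
    (g : List (List (String × Option String))) (j : Int) (hne : j ≠ (G.length : Int)) :
    pvWordsF (G ++ [g]) j = pvWordsF G j := by
  unfold pvWordsF
  by_cases h0 : 0 ≤ j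
  · simp only [h0, if_pos]
    have : j.toNat ≠ G.length := by omega
    rcases Nat.lt_or_ge j.toNat G.length with hlt | hge
    · rw [List.getD_eq_getElem?_getD, List.getD_eq_getElem?_getD, List.getElem?_append_left hlt]
    · have h1 : (G ++ [g]).getD j.toNat [] = [] := by
        apply List.getD_eq_default
        simp
        omega
      have h2 : G.getD j.toNat [] = [] := by
        apply List.getD_eq_default
        omega
      rw [h1, h2]
  · simp [h0]

theorem pvWordsF_snoc_self (G : List (List (List (String × Option String))))
    (g : List (List (String × Option String))) :
    pvWordsF (G ++ [g]) ((G.length : Int)) = pvWordOf g := by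
  unfold pvWordsF
  rw [if_pos (by positivity)]
  congr 1
  rw [Int.toNat_natCast, List.getD_eq_getElem?_getD]
  simp

-- B's labelling fold, characterized against the grouping pvGo
theorem pvB_fold (rest : List (List (String × Option String))) :
    ∀ (G : List (List (List (String × Option String))))
      (cur : List (List (String × Option String))) (s : Int)
      (L : List Int) (W : PySem.Dict Int String), 1 ≤ s → cur ≠ [] →
      L = pvLabels 0 G ++ cur.map (fun _ => (G.length : Int)) →
      (∀ j, W.getD j "" = pvWordsF (G ++ [cur]) j) →
      ((PySem.List.enumerate rest s).foldl pvStepB (L, W, (G.length : Int))).1 =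
          pvLabels 0 (G ++ pvGo cur rest) ∧
        ∀ j, ((PySem.List.enumerate rest s).foldl pvStepB (L, W, (G.length : Int))).2.1.getD j ""
          = pvWordsF (G ++ pvGo cur rest) j := by
  induction rest with
  | nil =>
      intro G cur s L W _ _ hL hW
      constructor
      · simp only [PySem.List.enumerate, List.foldl_nil, pvGo]
        rw [hL, pvLabels_append]
        simp
      · intro j
        simp only [PySem.List.enumerate, List.foldl_nil, pvGo]
        exact hW j
  | cons d rest ih =>
      intro G cur s L W hs hc hL hW
      rw [PySem.List.enumerate_cons, List.foldl_cons]
      have hz : (s == 0) = false := by simp; omega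
      by_cases hw : pvIsWS (pvRawS d) = true
      · have hstep : pvStepB (L, W, (G.length : Int)) (s, d) =
            (L ++ [(G.length : Int) + 1],
             (W.insert ((G.length : Int) + 1) "").insert ((G.length : Int) + 1)
               ((W.insert ((G.length : Int) + 1) "").getD ((G.length : Int) + 1) "" ++ pvRawS d),
             (G.length : Int) + 1) := by
          simp [pvStepB, hz, hw]
        rw [hstep]
        have hWcollapse :
            (W.insert ((G.length : Int) + 1) "").insert ((G.length : Int) + 1)
               ((W.insert ((G.length : Int) + 1) "").getD ((G.length : Int) + 1) "" ++ pvRawS d)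
            = W.insert ((G.length : Int) + 1) (pvRawS d) := by
          rw [PySem.Dict.getD_insert_self, PySem.Dict.insert_insert_self]
          simp
        rw [hWcollapse]
        have hlen : ((G ++ [cur]).length : Int) = (G.length : Int) + 1 := by simp
        have h1 := ih (G ++ [cur]) [d] (s + 1)
            (L ++ [(G.length : Int) + 1]) (W.insert ((G.length : Int) + 1) (pvRawS d))
            (by omega) (by simp)
            (by rw [hL, pvLabels_append]; simp)
            (by
              intro j
              by_cases hj : j = (G.length : Int) + 1
              · subst hj
                rw [PySem.Dict.getD_insert_self]
                have : ((G.length : Int) + 1) = (((G ++ [cur]).length : Nat) : Int) := by simp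
                rw [this, pvWordsF_snoc_self, pvWordOf_single]
              · rw [PySem.Dict.getD_insert_of_ne _ _ _ hj, hW j]
                exact (pvWordsF_snoc_ne (G ++ [cur]) [d] j (by simp; omega)).symm)
        rw [hlen] at h1
        have hgo : pvGo cur (d :: rest) = cur :: pvGo [d] rest := by simp [pvGo, hw]
        have hGG : G ++ pvGo cur (d :: rest) = (G ++ [cur]) ++ pvGo [d] rest := by
          rw [hgo]; simp
        rw [hGG]
        exact h1
      · have hstep : pvStepB (L, W, (G.length : Int)) (s, d) =
            (L ++ [(G.length : Int)],
             W.insert (G.length : Int) (W.getD (G.length : Int) "" ++ pvRawS d),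
             (G.length : Int)) := by
          simp [pvStepB, hz, hw]
        rw [hstep]
        have h1 := ih G (cur ++ [d]) (s + 1)
            (L ++ [(G.length : Int)])
            (W.insert (G.length : Int) (W.getD (G.length : Int) "" ++ pvRawS d))
            (by omega) (by simp)
            (by rw [hL]; simp)
            (by
              intro j
              by_cases hj : j = (G.length : Int)
              · subst hj
                rw [PySem.Dict.getD_insert_self, hW, pvWordsF_snoc_self, pvWordsF_snoc_self,
                  pvWordOf_append]
              · rw [PySem.Dict.getD_insert_of_ne _ _ _ hj, hW j,
                  pvWordsF_snoc_ne G cur j hj, pvWordsF_snoc_ne G (cur ++ [d]) j hj])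
        have hgo : pvGo cur (d :: rest) = pvGo (cur ++ [d]) rest := by simp [pvGo, hw]
        rw [hgo]
        exact h1

theorem pvZipConst {A B : Type} (l : List A) (c : B) :
    l.zip (l.map fun _ => c) = l.map (fun x => (x, c)) := by
  induction l with
  | nil => rfl
  | cons a t ih => simp only [List.map_cons, List.zip_cons_cons, ih]

theorem pvGo_flatten (rest : List (List (String × Option String))) :
    ∀ cur, (pvGo cur rest).flatten = cur ++ rest := by
  induction rest with
  | nil => intro cur; simp [pvGo]
  | cons d rest ih =>
      intro cur
      by_cases hw : pvIsWS (pvRawS d) = true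
      · simp [pvGo, hw, ih [d]]
      · simp [pvGo, hw, ih (cur ++ [d])]

-- B's second pass over the zipped labels, group by group
theorem pvZip (gs : List (List (List (String × Option String)))) :
    ∀ (j0 : Int) (F : Int → String),
      (∀ k : Nat, k < gs.length → F (j0 + (k : Int)) = pvWordOf (gs.getD k [])) →
      (gs.flatten.zip (pvLabels j0 gs)).map (fun p =>
          pvPassF (PySem.Str.strip (F p.2)) p.1) =
        (gs.map pvProcess).flatten := by
  induction gs with
  | nil => intro j0 F _; simp [pvLabels]
  | cons g gs ih =>
      intro j0 F hF
      have hlen : g.length = (g.map (fun _ => j0)).length := by simp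
      simp only [List.flatten_cons, pvLabels]
      rw [List.zip_append hlen, List.map_append]
      have h0 : F j0 = pvWordOf g := by
        have := hF 0 (by simp)
        simpa using this
      have hhead : ((g.zip (g.map fun _ => j0)).map (fun p =>
          pvPassF (PySem.Str.strip (F p.2)) p.1)) = pvProcess g := by
        rw [pvZipConst g j0, List.map_map]
        simp [pvProcess, h0, Function.comp_def]
      rw [hhead, ih (j0 + 1) F (by
        intro k hk
        have := hF (k + 1) (by simpa using Nat.succ_lt_succ hk)
        rw [show j0 + 1 + (k : Int) = j0 + ((k : Nat) + 1 : Nat) from by push_cast; ring]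
        simpa using this)]
      simp [pvProcess]

-- ===== VERDICT (by name: the statement is the Claim_ definition above) =====
theorem reconstruct_parent_words_spec : Claim_equal_reconstruct_parent_words := by
  intro dr _hDom _hPre
  unfold Spec_reconstruct_parent_words
  cases dr with
  | nil => rfl
  | cons d rest =>
      have hA :
          reconstruct_parent_words (d :: rest) = ((pvGo [d] rest).map pvProcess).flatten := by
        have h1 : (PySem.List.enumerate (d :: rest) 0).foldl pvStep1 ([], []) =
            ([] ++ (pvIgo [0] 1 rest).1, (pvIgo [0] 1 rest).2) := by
          rw [PySem.List.enumerate_cons]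
          have hstep : pvStep1 ([], []) (0, d) = ([], [0]) := by simp [pvStep1]
          rw [List.foldl_cons, hstep]
          exact pvEnum_fold rest 1 [] [0] (by norm_num) (by simp)
        have hne : (pvIgo [0] 1 rest).2 ≠ [] := pvIgo_snd_ne rest [0] 1 (by simp)
        have hne' : (pvIgo [0] 1 rest).2.isEmpty = false := by simpa [List.isEmpty_iff] using hne
        unfold reconstruct_parent_words
        rw [if_neg (by simp)]
        rw [h1]
        simp only [List.nil_append, hne', Bool.not_false, if_pos]
        have hM := pvMain rest [d] [] (by simp)
        simp only [List.length_nil, List.length_cons, List.length_nil, Nat.zero_add,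
          List.nil_append] at hM
        rw [show pvIntRange 0 1 = [(0 : Int)] from rfl] at hM
        rw [show ((1 : Nat) : Int) = (1 : Int) from rfl] at hM
        exact hM
      have hB : reconstruct_parent_words_alt (d :: rest) = ((pvGo [d] rest).map pvProcess).flatten := by
        unfold reconstruct_parent_words_alt
        rw [if_neg (by simp)]
        rw [PySem.List.enumerate_cons, List.foldl_cons]
        have hstep : pvStepB ([], PySem.Dict.empty, -1) ((0 : Int), d) =
            ([(0 : Int)], PySem.Dict.empty.insert 0 (pvRawS d), (0 : Int)) := by
          simp only [pvStepB]
          norm_num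
          rw [PySem.Dict.insert_insert_self]
        rw [hstep]
        have hfold := pvB_fold rest [] [d] 1 [(0 : Int)]
            (PySem.Dict.empty.insert 0 (pvRawS d)) (by norm_num) (by simp)
            (by simp [pvLabels])
            (by
              intro j
              by_cases hj : j = (0 : Int)
              · subst hj
                rw [PySem.Dict.getD_insert_self]
                have h := pvWordsF_snoc_self [] [d]
                simp only [List.nil_append, List.length_nil, Nat.cast_zero] at h ⊢
                rw [h, pvWordOf_single]
              · rw [PySem.Dict.getD_insert_of_ne _ _ _ hj, PySem.Dict.getD_empty]
                have h := pvWordsF_snoc_ne [] [d] j (by simpa using hj)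
                simp only [List.nil_append] at h ⊢
                rw [h]
                simp [pvWordsF, pvWordOf, PySem.Str.join, PySem.Chars.join_nil])
        simp only [List.nil_append, List.length_nil, Nat.cast_zero] at hfold
        obtain ⟨hL, hW⟩ := hfold
        set R := (PySem.List.enumerate rest 1).foldl pvStepB
            ([(0 : Int)], PySem.Dict.empty.insert 0 (pvRawS d), (0 : Int)) with hR
        have hflat : d :: rest = (pvGo [d] rest).flatten := by
          rw [pvGo_flatten rest [d]]; simp
        have hgoal : ((d :: rest).zip R.1).map
            (fun p => pvPassF (PySem.Str.strip (R.2.1.getD p.2 "")) p.1) =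
            (List.map pvProcess (pvGo [d] rest)).flatten := by
          rw [hflat, hL]
          exact pvZip (pvGo [d] rest) 0 (fun j => R.2.1.getD j "") (by
            intro k hk
            show R.2.1.getD (0 + (k : Int)) "" = pvWordOf ((pvGo [d] rest).getD k [])
            rw [hW]
            simp [pvWordsF])
        exact hgoal
      rw [hA, hB]
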